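-- pv_equiv track=rewrite | github.com/ZQuestClassic/ZQuestClassic | api_server/server.py | parse_replay
-- ===== SOURCE A (Python) =====
-- from typing import Dict, List, Tuple
--
-- def parse_replay(replay_text: str) -> Tuple[Dict[str, str], List[str]]:
--     """Returns tuple: meta, steps"""
--     meta = {}
--     steps = []
--     done_with_meta = False
--
--     for line in replay_text.splitlines():
--         if not line.startswith('M'):
--             done_with_meta = True
--         if done_with_meta and line:
--             steps.append(line)
--         else:
--             _, key, value = line.strip().split(' ', 2)
--             meta[key] = value
--
--     return meta, steps
-- ===== SOURCE B (Python) =====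
-- from typing import Dict, List, Tuple
--
-- def parse_replay(replay_text: str) -> Tuple[Dict[str, str], List[str]]:
--     """Returns tuple: meta, steps"""
--     lines = replay_text.splitlines()
--
--     # phase 1: length of the leading run of meta ('M'-prefixed) lines
--     k = 0
--     while k < len(lines) and lines[k].startswith('M'):
--         k += 1
--
--     # phase 2: parse the meta prefix
--     meta = {}
--     for line in lines[:k]:
--         _, key, value = line.strip().split(' ', 2)
--         meta[key] = value
--
--     # phase 3: the remaining non-empty lines are the steps
--     steps = [line for line in lines[k:] if line]
--
--     return meta, steps
-- ===== Notes on version B (the rewrite author's own statement) =====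
-- stated objective: simpler
-- what changed: Replaces the single flag-driven loop by a three-phase decomposition: measure the leading run of 'M'-prefixed meta lines, parse exactly that prefix into the meta dict, then take the remaining non-empty lines as steps.
import Mathlib
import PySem

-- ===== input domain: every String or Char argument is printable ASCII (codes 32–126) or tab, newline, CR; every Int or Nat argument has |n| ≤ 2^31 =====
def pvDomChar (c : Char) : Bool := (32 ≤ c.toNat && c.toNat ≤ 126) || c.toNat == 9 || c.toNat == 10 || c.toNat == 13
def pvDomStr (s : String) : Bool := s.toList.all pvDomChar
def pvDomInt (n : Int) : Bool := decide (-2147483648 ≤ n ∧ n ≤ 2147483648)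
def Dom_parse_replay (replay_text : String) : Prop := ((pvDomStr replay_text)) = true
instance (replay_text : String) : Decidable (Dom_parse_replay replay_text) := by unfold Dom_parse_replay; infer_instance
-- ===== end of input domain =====

-- B replaces A's flag-driven single loop by a three-phase decomposition (measure the 'M'-prefix,
-- parse it into meta, collect remaining non-empty lines as steps); same cost, plainer structure.

-- ===== PORT A =====
-- `_, key, value = line.strip().split(' ', 2); meta[key] = value` — Python raises ValueError unless
-- the split yields exactly 3 parts (excluded by Pre_); the port leaves meta unchanged there.
def pvParseMeta (d : PySem.Dict String String) (line : String) : PySem.Dict String String :=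
  match (PySem.Str.splitMax? (PySem.Str.strip line) " " 2).getD [] with
  | [_, key, value] => d.insert key value
  | _ => d

-- the body of A's for-loop over (meta, steps, done_with_meta)
def pvStepA (acc : PySem.Dict String String × List String × Bool) (line : String) :
    PySem.Dict String String × List String × Bool :=
  let done := if !(PySem.Str.startswith line "M") then true else acc.2.2
  if done && line != "" then (acc.1, acc.2.1 ++ [line], done)
  else (pvParseMeta acc.1 line, acc.2.1, done)

def parse_replay (replay_text : String) : (List (String × String)) × List String :=
  let r := (PySem.Str.splitlines replay_text).foldl pvStepA (PySem.Dict.empty, [], false)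
  (r.1.items, r.2.1)

-- ===== PORT B =====
-- phase 1 of Source B: the while-loop counting the leading run of 'M'-prefixed lines
def pvPrefixLen : List String → Nat
  | [] => 0
  | l :: ls => if PySem.Str.startswith l "M" then pvPrefixLen ls + 1 else 0

def parse_replay_alt (replay_text : String) : (List (String × String)) × List String :=
  let lines := PySem.Str.splitlines replay_text
  let k := pvPrefixLen lines
  let metaDict := (lines.take k).foldl pvParseMeta PySem.Dict.empty
  let steps := (lines.drop k).filter (fun l => l != "")
  (metaDict.items, steps)

-- ===== PRECONDITION & SPEC =====
-- Pre_ excludes exactly the inputs on which Python A raises ValueError: a line in the leading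
-- 'M'-prefixed meta run whose strip().split(' ', 2) does not yield 3 parts, or an empty line
-- after that run (which falls into the same unpack).
def Pre_parse_replay (replay_text : String) : Prop :=
  (∀ l ∈ (PySem.Str.splitlines replay_text).takeWhile (fun l => PySem.Str.startswith l "M"),
      ((PySem.Str.splitMax? (PySem.Str.strip l) " " 2).getD []).length = 3) ∧
  (∀ l ∈ (PySem.Str.splitlines replay_text).dropWhile (fun l => PySem.Str.startswith l "M"),
      l ≠ "")
instance (replay_text : String) : Decidable (Pre_parse_replay replay_text) := by
  unfold Pre_parse_replay; infer_instance

def pvWitness_parse_replay : String := "M a b\nM k v w\nstep1\nMstep2"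

def Spec_parse_replay (replay_text : String) (out : (List (String × String)) × List String) : Prop := out = parse_replay_alt replay_text
instance (replay_text : String) (out : (List (String × String)) × List String) : Decidable (Spec_parse_replay replay_text out) := by unfold Spec_parse_replay; infer_instance

-- ===== CLAIM (what is proved, stated in full; the proofs are below) =====
def Claim_equal_parse_replay : Prop := ∀ (replay_text : String), Dom_parse_replay replay_text → Pre_parse_replay replay_text → Spec_parse_replay replay_text (parse_replay replay_text)

-- ===== LEMMAS AND PROOFS =====

theorem pvParseMeta_empty (m : PySem.Dict String String) : pvParseMeta m "" = m := rfl

-- once done_with_meta is true, A keeps it and appends exactly the non-empty lines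
theorem pvFoldA_done (ls : List String) (m : PySem.Dict String String) (st : List String) :
    ls.foldl pvStepA (m, st, true) = (m, st ++ ls.filter (fun l => l != ""), true) := by
  induction ls generalizing st with
  | nil => simp
  | cons l ls ih =>
    by_cases hl : l = ""
    · subst hl
      show List.foldl pvStepA (pvStepA (m, st, true) "") ls = _
      simp only [pvStepA, ite_self, bne_self_eq_false, Bool.and_false, Bool.false_eq_true,
        if_false, pvParseMeta_empty]
      rw [ih]
      simp
    · have hne : (l != "") = true := by simpa using hl
      show List.foldl pvStepA (pvStepA (m, st, true) l) ls = _
      simp only [pvStepA, ite_self, hne, Bool.and_true, if_true]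
      rw [ih]
      simp [hne]

-- from done_with_meta = false, A computes B's phases: meta from the 'M'-prefix,
-- steps = the non-empty lines of the remainder
theorem pvFoldA_meta (ls : List String) (m : PySem.Dict String String) (st : List String) :
    (((ls.foldl pvStepA (m, st, false)).1, (ls.foldl pvStepA (m, st, false)).2.1) :
        PySem.Dict String String × List String) =
      ((ls.takeWhile (fun l => PySem.Str.startswith l "M")).foldl pvParseMeta m,
       st ++ (ls.dropWhile (fun l => PySem.Str.startswith l "M")).filter (fun l => l != "")) := by
  induction ls generalizing m st with
  | nil => simp
  | cons l ls ih =>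
    rw [List.foldl_cons]
    by_cases hM : PySem.Str.startswith l "M" = true
    · have hcMt : PySem.Chars.startswith l.toList ['M'] = true := by simpa using hM
      have hs : pvStepA (m, st, false) l = (pvParseMeta m l, st, false) := by
        simp [pvStepA, hcMt]
      rw [hs, List.takeWhile_cons_of_pos (by simpa using hM),
        List.dropWhile_cons_of_pos (by simpa using hM), List.foldl_cons]
      exact ih (pvParseMeta m l) st
    · have hM' : PySem.Str.startswith l "M" = false := by simpa using hM
      have hcM : PySem.Chars.startswith l.toList ['M'] = false := by simpa using hM
      rw [List.takeWhile_cons_of_neg (by simpa using hM),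
        List.dropWhile_cons_of_neg (by simpa using hM)]
      by_cases hl : l = ""
      · have hs : pvStepA (m, st, false) l = (m, st, true) := by
          subst hl; rfl
        rw [hs, pvFoldA_done]
        subst hl
        simp
      · have hne : (l != "") = true := by simpa using hl
        have hs : pvStepA (m, st, false) l = (m, st ++ [l], true) := by
          simp [pvStepA, hcM, hne]
        rw [hs, pvFoldA_done]
        simp [hne]

-- B's while-loop counts exactly the takeWhile prefix of 'M'-lines
theorem pvPrefixLen_take (ls : List String) :
    ls.take (pvPrefixLen ls) = ls.takeWhile (fun l => PySem.Str.startswith l "M") := by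
  induction ls with
  | nil => rfl
  | cons l ls ih =>
    by_cases h : PySem.Str.startswith l "M" = true
    · have hc : PySem.Chars.startswith l.toList ['M'] = true := by simpa using h
      simp [pvPrefixLen, hc, ih]
    · have hc : PySem.Chars.startswith l.toList ['M'] = false := by simpa using h
      simp [pvPrefixLen, hc]

theorem pvPrefixLen_drop (ls : List String) :
    ls.drop (pvPrefixLen ls) = ls.dropWhile (fun l => PySem.Str.startswith l "M") := by
  induction ls with
  | nil => rfl
  | cons l ls ih =>
    by_cases h : PySem.Str.startswith l "M" = true
    · have hc : PySem.Chars.startswith l.toList ['M'] = true := by simpa using h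
      simp [pvPrefixLen, hc, ih]
    · have hc : PySem.Chars.startswith l.toList ['M'] = false := by simpa using h
      simp [pvPrefixLen, hc]

-- ===== VERDICT (by name: the statement is the Claim_ definition above) =====
theorem parse_replay_spec : Claim_equal_parse_replay := by
  intro s _ _
  unfold Spec_parse_replay
  have h := pvFoldA_meta (PySem.Str.splitlines s) PySem.Dict.empty []
  have h1 := congrArg Prod.fst h
  have h2 := congrArg Prod.snd h
  simp only at h1 h2
  simp only [parse_replay, parse_replay_alt, pvPrefixLen_take, pvPrefixLen_drop, h1, h2]
  simp
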